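-- pv_equiv track=rewrite | github.com/amitashukla/harbor | references/knowledge/normalize_resources.py | infer_substances
-- ===== SOURCE A (Python) =====
-- SUBSTANCE_KEYWORDS = {
--     "alcohol":          "alcohol",
--     "opioid":           "opioids",
--     "heroin":           "opioids",
--     "methadone":        "opioids",
--     "buprenorphine":    "opioids",
--     "naltrexone":       "opioids",    # used for both, but primarily opioids
--     "naloxone":         "opioids",
--     "cocaine":          "stimulants",
--     "methamphetamine":  "stimulants",
--     "stimulant":        "stimulants",
--     "cannabis":         "cannabis",
--     "marijuana":        "cannabis",
--     "benzodiazepine":   "benzodiazepines",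
-- }
--
-- def infer_substances(services_dict):
--     """Infer substance types from multiple service fields."""
--     substances = set()
--     # Check across all service fields for substance keywords
--     for code in ("OM", "OT", "PHR", "TC", "AUT", "TAP"):
--         for item in services_dict.get(code, []):
--             item_lower = item.lower()
--             for keyword, substance in SUBSTANCE_KEYWORDS.items():
--                 if keyword in item_lower:
--                     substances.add(substance)
--     # Alcohol-specific check
--     aut = services_dict.get("AUT", [])
--     for item in aut:
--         if "alcohol" in item.lower() and "does not" not in item.lower():
--             substances.add("alcohol")
--     return sorted(substances)
-- ===== SOURCE B (Python) =====
-- # Inverted index: keywords grouped by substance, substances pre-listed in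
-- # alphabetical (output) order, so the result list is built directly in order
-- # with no set and no sort.  The original's extra AUT/alcohol pass is a no-op
-- # (AUT is already scanned and 'alcohol' maps to 'alcohol') and is dropped.
-- _SUBSTANCE_GROUPS = [
--     ("alcohol",         ("alcohol",)),
--     ("benzodiazepines", ("benzodiazepine",)),
--     ("cannabis",        ("cannabis", "marijuana")),
--     ("opioids",         ("opioid", "heroin", "methadone", "buprenorphine",
--                          "naltrexone", "naloxone")),
--     ("stimulants",      ("cocaine", "methamphetamine", "stimulant")),
-- ]
--
-- def infer_substances(services_dict):
--     """Infer substance types from multiple service fields."""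
--     texts = [item.lower()
--              for code in ("OM", "OT", "PHR", "TC", "AUT", "TAP")
--              for item in services_dict.get(code, [])]
--     return [substance
--             for substance, keywords in _SUBSTANCE_GROUPS
--             if any(kw in t for kw in keywords for t in texts)]
-- ===== Notes on version B (the rewrite author's own statement) =====
-- stated objective: alternative
-- what changed: B replaces A's item-major scan into a set followed by sorted() with an inverted index: keywords are grouped per substance and the five substances are pre-listed in alphabetical order, so one substance-major pass over the lowercased corpus emits the result list directly in order, with no set and no sort; A's redundant AUT/alcohol second pass (a no-op, since AUT is already scanned and 'alcohol' maps to 'alcohol') is dropped.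
import Mathlib
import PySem

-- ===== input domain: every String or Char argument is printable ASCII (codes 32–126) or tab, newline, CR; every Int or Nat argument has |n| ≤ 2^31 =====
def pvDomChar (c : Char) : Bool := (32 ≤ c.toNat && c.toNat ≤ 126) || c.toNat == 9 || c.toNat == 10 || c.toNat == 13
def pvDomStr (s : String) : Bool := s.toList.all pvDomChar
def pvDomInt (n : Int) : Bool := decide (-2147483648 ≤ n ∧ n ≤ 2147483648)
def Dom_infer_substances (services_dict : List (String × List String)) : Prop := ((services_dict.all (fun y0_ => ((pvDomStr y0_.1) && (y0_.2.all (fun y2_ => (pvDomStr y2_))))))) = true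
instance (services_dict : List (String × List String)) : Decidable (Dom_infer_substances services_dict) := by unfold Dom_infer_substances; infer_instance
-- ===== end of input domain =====

-- B uses an inverted index (keywords grouped per substance, substances pre-listed in
-- alphabetical order) and emits the result list directly in order, with no set and no
-- sort; the original's redundant AUT/alcohol second pass is dropped (objective: alternative).

-- module constant of Python A
def SUBSTANCE_KEYWORDS : List (String × String) :=
  [("alcohol", "alcohol"), ("opioid", "opioids"), ("heroin", "opioids"),
   ("methadone", "opioids"), ("buprenorphine", "opioids"), ("naltrexone", "opioids"),
   ("naloxone", "opioids"), ("cocaine", "stimulants"), ("methamphetamine", "stimulants"),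
   ("stimulant", "stimulants"), ("cannabis", "cannabis"), ("marijuana", "cannabis"),
   ("benzodiazepine", "benzodiazepines")]

-- services_dict.get(code, [])
def svcGet (services_dict : List (String × List String)) (code : String) : List String :=
  (PySem.Dict.mk services_dict).getD code []

-- ===== PORT A =====
def infer_substances (services_dict : List (String × List String)) : List String :=
  let substances : PySem.Set String :=
    (["OM", "OT", "PHR", "TC", "AUT", "TAP"] : List String).foldl (fun substances code =>
      (svcGet services_dict code).foldl (fun substances item =>
        let item_lower := PySem.Str.lower item
        SUBSTANCE_KEYWORDS.foldl (fun substances kv =>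
          if PySem.Str.isIn kv.1 item_lower then PySem.Set.add substances kv.2 else substances)
          substances)
        substances)
      PySem.Set.empty
  let aut := svcGet services_dict "AUT"
  let substances := aut.foldl (fun substances item =>
    if PySem.Str.isIn "alcohol" (PySem.Str.lower item)
        && !(PySem.Str.isIn "does not" (PySem.Str.lower item))
    then PySem.Set.add substances "alcohol" else substances) substances
  PySem.List.sorted substances (fun x => x)

-- ===== PORT B =====
-- module constant of Python B: keywords grouped per substance, substances alphabetical
def SUBSTANCE_GROUPS : List (String × List String) :=
  [("alcohol", ["alcohol"]),
   ("benzodiazepines", ["benzodiazepine"]),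
   ("cannabis", ["cannabis", "marijuana"]),
   ("opioids", ["opioid", "heroin", "methadone", "buprenorphine", "naltrexone", "naloxone"]),
   ("stimulants", ["cocaine", "methamphetamine", "stimulant"])]

def infer_substances_alt (services_dict : List (String × List String)) : List String :=
  let texts : List String :=
    (["OM", "OT", "PHR", "TC", "AUT", "TAP"] : List String).flatMap
      (fun code => (svcGet services_dict code).map PySem.Str.lower)
  SUBSTANCE_GROUPS.filterMap (fun g =>
    if g.2.any (fun kw => texts.any (fun t => PySem.Str.isIn kw t))
    then some g.1 else none)

-- ===== PRECONDITION & SPEC =====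
def Spec_infer_substances (services_dict : List (String × List String)) (out : List String) : Prop := out = infer_substances_alt services_dict
instance (services_dict : List (String × List String)) (out : List String) : Decidable (Spec_infer_substances services_dict out) := by unfold Spec_infer_substances; infer_instance

-- ===== CLAIM =====
def Claim_equal_infer_substances : Prop := ∀ (services_dict : List (String × List String)), Dom_infer_substances services_dict → Spec_infer_substances services_dict (infer_substances services_dict)

-- ===== LEMMAS AND PROOFS =====

-- a fold whose step only ever adds elements satisfying P: membership characterisation
theorem mem_foldl_of_step {α β : Type} (g : List β → α → List β) (P : α → β → Prop)
    (hg : ∀ s a x, x ∈ g s a ↔ x ∈ s ∨ P a x) :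
    ∀ (l : List α) (s : List β) (x : β), x ∈ l.foldl g s ↔ x ∈ s ∨ ∃ a ∈ l, P a x := by
  intro l
  induction l with
  | nil => simp
  | cons a t ih =>
    intro s x
    simp only [List.foldl_cons, ih, hg, List.mem_cons]
    constructor
    · rintro ((h | h) | ⟨b, hb, hp⟩)
      · exact Or.inl h
      · exact Or.inr ⟨a, Or.inl rfl, h⟩
      · exact Or.inr ⟨b, Or.inr hb, hp⟩
    · rintro (h | ⟨b, (rfl | hb), hp⟩)
      · exact Or.inl (Or.inl h)
      · exact Or.inl (Or.inr hp)
      · exact Or.inr ⟨b, hb, hp⟩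

theorem nodup_foldl_of_step {α β : Type} (g : List β → α → List β)
    (hg : ∀ s a, s.Nodup → (g s a).Nodup) :
    ∀ (l : List α) (s : List β), s.Nodup → (l.foldl g s).Nodup := by
  intro l
  induction l with
  | nil => intro s hs; simpa using hs
  | cons a t ih => intro s hs; exact ih _ (hg s a hs)

-- the step of A's innermost (keyword) loop
theorem mem_kwStep (il : String) (s : PySem.Set String) (kv : String × String) (x : String) :
    x ∈ (if PySem.Str.isIn kv.1 il then PySem.Set.add s kv.2 else s) ↔
      x ∈ s ∨ (PySem.Str.isIn kv.1 il = true ∧ x = kv.2) := by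
  by_cases h : PySem.Str.isIn kv.1 il = true
  · rw [if_pos h, PySem.Set.mem_add]; tauto
  · rw [if_neg h]; tauto

theorem nodup_kwStep (il : String) (s : PySem.Set String) (kv : String × String)
    (hs : List.Nodup s) :
    List.Nodup (if PySem.Str.isIn kv.1 il then PySem.Set.add s kv.2 else s) := by
  split_ifs with h
  · exact PySem.Set.nodup_add s kv.2 hs
  · exact hs

-- A's per-item keyword fold
theorem mem_itemFold (s : PySem.Set String) (item x : String) :
    x ∈ SUBSTANCE_KEYWORDS.foldl (fun s kv =>
        if PySem.Str.isIn kv.1 (PySem.Str.lower item) then PySem.Set.add s kv.2 else s) s ↔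
      x ∈ s ∨ ∃ kv ∈ SUBSTANCE_KEYWORDS,
        PySem.Str.isIn kv.1 (PySem.Str.lower item) = true ∧ x = kv.2 :=
  mem_foldl_of_step _ _ (fun s kv x => mem_kwStep (PySem.Str.lower item) s kv x)
    SUBSTANCE_KEYWORDS s x

-- A's main nested loop: full membership characterisation
theorem mem_mainFold (services_dict : List (String × List String)) (x : String) :
    x ∈ (["OM", "OT", "PHR", "TC", "AUT", "TAP"] : List String).foldl (fun substances code =>
        (svcGet services_dict code).foldl (fun substances item =>
          SUBSTANCE_KEYWORDS.foldl (fun substances kv =>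
            if PySem.Str.isIn kv.1 (PySem.Str.lower item) then PySem.Set.add substances kv.2
            else substances) substances) substances) PySem.Set.empty ↔
      ∃ code ∈ (["OM", "OT", "PHR", "TC", "AUT", "TAP"] : List String),
        ∃ item ∈ svcGet services_dict code, ∃ kv ∈ SUBSTANCE_KEYWORDS,
          PySem.Str.isIn kv.1 (PySem.Str.lower item) = true ∧ x = kv.2 := by
  have hitem : ∀ (code : String) (s : PySem.Set String) (x : String),
      x ∈ (svcGet services_dict code).foldl (fun substances item =>
          SUBSTANCE_KEYWORDS.foldl (fun substances kv =>
            if PySem.Str.isIn kv.1 (PySem.Str.lower item) then PySem.Set.add substances kv.2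
            else substances) substances) s ↔
        x ∈ s ∨ ∃ item ∈ svcGet services_dict code, ∃ kv ∈ SUBSTANCE_KEYWORDS,
          PySem.Str.isIn kv.1 (PySem.Str.lower item) = true ∧ x = kv.2 := by
    intro code s x
    exact mem_foldl_of_step _
      (fun item x => ∃ kv ∈ SUBSTANCE_KEYWORDS,
          PySem.Str.isIn kv.1 (PySem.Str.lower item) = true ∧ x = kv.2)
      (fun s item x => mem_itemFold s item x) (svcGet services_dict code) s x
  have h := mem_foldl_of_step _
      (fun code x => ∃ item ∈ svcGet services_dict code, ∃ kv ∈ SUBSTANCE_KEYWORDS,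
          PySem.Str.isIn kv.1 (PySem.Str.lower item) = true ∧ x = kv.2)
      (fun s code x => hitem code s x)
      (["OM", "OT", "PHR", "TC", "AUT", "TAP"] : List String) PySem.Set.empty x
  simpa [PySem.Set.empty] using h

-- nodup of A's whole accumulated set
theorem nodup_A_set (services_dict : List (String × List String)) :
    List.Nodup
      ((svcGet services_dict "AUT").foldl (fun substances item =>
        if PySem.Str.isIn "alcohol" (PySem.Str.lower item)
            && !(PySem.Str.isIn "does not" (PySem.Str.lower item))
        then PySem.Set.add substances "alcohol" else substances)
        ((["OM", "OT", "PHR", "TC", "AUT", "TAP"] : List String).foldl (fun substances code =>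
          (svcGet services_dict code).foldl (fun substances item =>
            SUBSTANCE_KEYWORDS.foldl (fun substances kv =>
              if PySem.Str.isIn kv.1 (PySem.Str.lower item) then PySem.Set.add substances kv.2
              else substances) substances) substances) PySem.Set.empty)) := by
  apply nodup_foldl_of_step
  · intro s a hs
    split_ifs with h
    · exact PySem.Set.nodup_add s "alcohol" hs
    · exact hs
  · apply nodup_foldl_of_step
    · intro s code hs
      apply nodup_foldl_of_step
      · intro s item hs
        exact nodup_foldl_of_step _ (fun s kv hs => nodup_kwStep (PySem.Str.lower item) s kv hs)
          SUBSTANCE_KEYWORDS s hs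
      · exact hs
    · simp [PySem.Set.empty]

-- membership in A's final set (the alcohol pass is absorbed by the main loop)
theorem mem_A_set (services_dict : List (String × List String)) (x : String) :
    x ∈ (svcGet services_dict "AUT").foldl (fun substances item =>
        if PySem.Str.isIn "alcohol" (PySem.Str.lower item)
            && !(PySem.Str.isIn "does not" (PySem.Str.lower item))
        then PySem.Set.add substances "alcohol" else substances)
        ((["OM", "OT", "PHR", "TC", "AUT", "TAP"] : List String).foldl (fun substances code =>
          (svcGet services_dict code).foldl (fun substances item =>
            SUBSTANCE_KEYWORDS.foldl (fun substances kv =>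
              if PySem.Str.isIn kv.1 (PySem.Str.lower item) then PySem.Set.add substances kv.2
              else substances) substances) substances) PySem.Set.empty) ↔
      ∃ code ∈ (["OM", "OT", "PHR", "TC", "AUT", "TAP"] : List String),
        ∃ item ∈ svcGet services_dict code, ∃ kv ∈ SUBSTANCE_KEYWORDS,
          PySem.Str.isIn kv.1 (PySem.Str.lower item) = true ∧ x = kv.2 := by
  have halc : ∀ (s : PySem.Set String) (item x : String),
      x ∈ (if PySem.Str.isIn "alcohol" (PySem.Str.lower item)
              && !(PySem.Str.isIn "does not" (PySem.Str.lower item))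
            then PySem.Set.add s "alcohol" else s) ↔
        x ∈ s ∨ ((PySem.Str.isIn "alcohol" (PySem.Str.lower item)
              && !(PySem.Str.isIn "does not" (PySem.Str.lower item))) = true ∧ x = "alcohol") := by
    intro s item x
    by_cases h : (PySem.Str.isIn "alcohol" (PySem.Str.lower item)
        && !(PySem.Str.isIn "does not" (PySem.Str.lower item))) = true
    · rw [if_pos h, PySem.Set.mem_add]; tauto
    · rw [if_neg h]; tauto
  rw [mem_foldl_of_step _ _ (fun s item x => halc s item x), mem_mainFold]
  constructor
  · rintro (h | ⟨item, hitem, hcond, rfl⟩)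
    · exact h
    · refine ⟨"AUT", by decide, item, hitem, ("alcohol", "alcohol"), by decide, ?_, rfl⟩
      exact (Bool.and_eq_true _ _).mp hcond |>.1
  · exact Or.inl

-- B's grouped table names the same (keyword, substance) pairs as A's flat dict
theorem groups_skw (P : String → Bool) (x : String) :
    (∃ g ∈ SUBSTANCE_GROUPS, g.2.any P = true ∧ x = g.1) ↔
      ∃ kv ∈ SUBSTANCE_KEYWORDS, P kv.1 = true ∧ x = kv.2 := by
  constructor
  · rintro ⟨g, hg, hany, rfl⟩
    fin_cases hg <;>
      simp only [List.any_cons, List.any_nil, Bool.or_eq_true, Bool.false_eq_true, or_false]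
        at hany
    · exact ⟨("alcohol", "alcohol"), by decide, hany, rfl⟩
    · exact ⟨("benzodiazepine", "benzodiazepines"), by decide, hany, rfl⟩
    · rcases hany with h | h
      · exact ⟨("cannabis", "cannabis"), by decide, h, rfl⟩
      · exact ⟨("marijuana", "cannabis"), by decide, h, rfl⟩
    · rcases hany with h | h | h | h | h | h
      · exact ⟨("opioid", "opioids"), by decide, h, rfl⟩
      · exact ⟨("heroin", "opioids"), by decide, h, rfl⟩
      · exact ⟨("methadone", "opioids"), by decide, h, rfl⟩
      · exact ⟨("buprenorphine", "opioids"), by decide, h, rfl⟩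
      · exact ⟨("naltrexone", "opioids"), by decide, h, rfl⟩
      · exact ⟨("naloxone", "opioids"), by decide, h, rfl⟩
    · rcases hany with h | h | h
      · exact ⟨("cocaine", "stimulants"), by decide, h, rfl⟩
      · exact ⟨("methamphetamine", "stimulants"), by decide, h, rfl⟩
      · exact ⟨("stimulant", "stimulants"), by decide, h, rfl⟩
  · rintro ⟨kv, hkv, hP, rfl⟩
    fin_cases hkv <;>
      first
        | exact ⟨("alcohol", ["alcohol"]), by simp [SUBSTANCE_GROUPS], by simp [hP], rfl⟩
        | exact ⟨("benzodiazepines", ["benzodiazepine"]), by simp [SUBSTANCE_GROUPS],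
            by simp [hP], rfl⟩
        | exact ⟨("cannabis", ["cannabis", "marijuana"]), by simp [SUBSTANCE_GROUPS],
            by simp [hP], rfl⟩
        | exact ⟨("opioids", ["opioid", "heroin", "methadone", "buprenorphine",
            "naltrexone", "naloxone"]), by simp [SUBSTANCE_GROUPS], by simp [hP], rfl⟩
        | exact ⟨("stimulants", ["cocaine", "methamphetamine", "stimulant"]),
            by simp [SUBSTANCE_GROUPS], by simp [hP], rfl⟩

-- the filterMap of B is a sublist of the substance column
theorem filterMap_if_sublist {α β : Type} (c : α → Bool) (f : α → β) (l : List α) :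
    (l.filterMap (fun g => if c g then some (f g) else none)).Sublist (l.map f) := by
  induction l with
  | nil => simp
  | cons a t ih =>
    simp only [List.filterMap_cons, List.map_cons]
    split_ifs with h
    · exact ih.cons₂ (f a)
    · exact ih.cons (f a)

-- membership in B's output
theorem mem_B (services_dict : List (String × List String)) (x : String) :
    x ∈ infer_substances_alt services_dict ↔
      ∃ code ∈ (["OM", "OT", "PHR", "TC", "AUT", "TAP"] : List String),
        ∃ item ∈ svcGet services_dict code, ∃ kv ∈ SUBSTANCE_KEYWORDS,
          PySem.Str.isIn kv.1 (PySem.Str.lower item) = true ∧ x = kv.2 := by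
  unfold infer_substances_alt
  dsimp only
  rw [List.mem_filterMap]
  have h1 : (∃ g, g ∈ SUBSTANCE_GROUPS ∧
      (if g.2.any (fun kw => ((["OM", "OT", "PHR", "TC", "AUT", "TAP"] : List String).flatMap
          (fun code => (svcGet services_dict code).map PySem.Str.lower)).any
          (fun t => PySem.Str.isIn kw t)) then some g.1 else none) = some x) ↔
      ∃ g ∈ SUBSTANCE_GROUPS, g.2.any (fun kw =>
          ((["OM", "OT", "PHR", "TC", "AUT", "TAP"] : List String).flatMap
            (fun code => (svcGet services_dict code).map PySem.Str.lower)).any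
            (fun t => PySem.Str.isIn kw t)) = true ∧ x = g.1 := by
    constructor
    · rintro ⟨g, hg, h⟩
      by_cases hc : g.2.any (fun kw =>
          ((["OM", "OT", "PHR", "TC", "AUT", "TAP"] : List String).flatMap
            (fun code => (svcGet services_dict code).map PySem.Str.lower)).any
            (fun t => PySem.Str.isIn kw t)) = true
      · rw [if_pos hc] at h
        exact ⟨g, hg, hc, (Option.some.inj h).symm⟩
      · rw [if_neg hc] at h; cases h
    · rintro ⟨g, hg, hc, rfl⟩
      exact ⟨g, hg, by rw [if_pos hc]⟩
  rw [h1, groups_skw]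
  constructor
  · rintro ⟨kv, hkv, hany, rfl⟩
    obtain ⟨t, ht, hin⟩ := List.any_eq_true.mp hany
    obtain ⟨code, hcode, ht⟩ := List.mem_flatMap.mp ht
    obtain ⟨item, hitem, rfl⟩ := List.mem_map.mp ht
    exact ⟨code, hcode, item, hitem, kv, hkv, hin, rfl⟩
  · rintro ⟨code, hcode, item, hitem, kv, hkv, hin, rfl⟩
    refine ⟨kv, hkv, List.any_eq_true.mpr ⟨PySem.Str.lower item,
      List.mem_flatMap.mpr ⟨code, hcode, List.mem_map.mpr ⟨item, hitem, rfl⟩⟩, hin⟩, rfl⟩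

-- B's output is strictly increasing (a sublist of the alphabetical substance column)
theorem pairwise_B (services_dict : List (String × List String)) :
    (infer_substances_alt services_dict).Pairwise (fun a b => a < b) := by
  have hsub := filterMap_if_sublist
    (fun g : String × List String => g.2.any (fun kw =>
      ((["OM", "OT", "PHR", "TC", "AUT", "TAP"] : List String).flatMap
        (fun code => (svcGet services_dict code).map PySem.Str.lower)).any
        (fun t => PySem.Str.isIn kw t)))
    Prod.fst SUBSTANCE_GROUPS
  have hpw : (SUBSTANCE_GROUPS.map Prod.fst).Pairwise (fun a b : String => a < b) := by
    simp only [String.lt_iff_toList_lt]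
    decide
  exact List.Pairwise.sublist hsub hpw

-- ===== VERDICT =====
theorem infer_substances_spec : Claim_equal_infer_substances := by
  intro services_dict _
  unfold Spec_infer_substances
  unfold infer_substances
  dsimp only
  apply PySem.List.sorted_eq_of_perm_of_pairwise_lt
  · rw [List.perm_ext_iff_of_nodup
      ((pairwise_B services_dict).imp ne_of_lt) (nodup_A_set services_dict)]
    intro x
    rw [mem_B, mem_A_set]
  · exact pairwise_B services_dict
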